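-- pv_equiv track=rewrite | github.com/yukikitayama/leetcode-python | hard/hard_1649_create_sorted_array_through_instructions.py | createSortedArray1
-- ===== SOURCE A (Python) =====
-- from typing import List
-- import bisect
--
-- def createSortedArray1(instructions: List[int]) -> int:
--     """Naive, T: O(NNlogN)"""
--     ans = 0
--     nums = []
--
--     for inst in instructions:
--
--         if not nums:
--             nums.append(inst)
--
--         else:
--             left = bisect.bisect_left(nums, inst)
--             right = bisect.bisect_right(nums, inst)
--             right = len(nums) - right
--
--             ans += min(left, right)
--
--             nums.append(inst)
--             nums.sort()
--
--     return ans
-- ===== SOURCE B (Python) =====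
-- from typing import List
--
--
-- def createSortedArray1(instructions: List[int]) -> int:
--     """One pass over the input; no sorted list, no bisect, no re-sorting:
--     the cost of each element is counted directly against the prefix seen so far."""
--     ans = 0
--     seen = []
--     for v in instructions:
--         less = 0
--         greater = 0
--         for x in seen:
--             if x < v:
--                 less += 1
--             elif x > v:
--                 greater += 1
--         ans += min(less, greater)
--         seen.append(v)
--     return ans
-- ===== Notes on version B (the rewrite author's own statement) =====
-- stated objective: simpler
-- what changed: B drops A's sorted-list machinery (bisect_left, bisect_right, append + re-sort each step) and instead counts, for each element, the smaller and greater elements in the prefix seen so far with one plain inner loop.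
import Mathlib
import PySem

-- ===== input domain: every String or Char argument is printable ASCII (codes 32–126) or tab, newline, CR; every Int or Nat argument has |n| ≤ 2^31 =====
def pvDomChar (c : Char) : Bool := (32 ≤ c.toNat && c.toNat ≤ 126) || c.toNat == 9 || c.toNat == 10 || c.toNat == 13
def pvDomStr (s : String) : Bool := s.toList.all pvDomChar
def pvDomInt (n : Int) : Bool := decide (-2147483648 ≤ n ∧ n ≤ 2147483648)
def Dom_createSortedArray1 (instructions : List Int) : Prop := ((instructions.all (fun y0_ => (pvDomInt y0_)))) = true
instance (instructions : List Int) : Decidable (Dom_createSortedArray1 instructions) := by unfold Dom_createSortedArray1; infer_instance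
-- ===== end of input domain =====

-- B replaces A's per-element "bisect twice + re-sort" bookkeeping by a direct count of
-- smaller/greater elements in the already-seen prefix: shorter and plainer, same results (objective: simpler; not faster).


-- ===== PORT A =====
-- loop body of A: bisect_left/bisect_right on the sorted list `nums`, add min(left, right),
-- then append and re-sort (bisect.bisect_left/right are PySem.List.bisectLeft/bisectRight,
-- nums.sort() is PySem.List.sorted with the identity key)
def pvStepA (st : Int × List Int) (inst : Int) : Int × List Int :=
  let ans := st.1
  let nums := st.2
  if nums = [] then
    (ans, nums ++ [inst])
  else
    let left : Nat := PySem.List.bisectLeft nums inst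
    let right : Nat := PySem.List.bisectRight nums inst
    let right : Int := (nums.length : Int) - (right : Int)
    (ans + min (left : Int) right, PySem.List.sorted (nums ++ [inst]) (fun x => x) false)

def createSortedArray1 (instructions : List Int) : Int :=
  (instructions.foldl pvStepA (0, [])).1

-- ===== PORT B =====
-- inner loop of B: count elements of `seen` below / above v
def pvCount (seen : List Int) (v : Int) : Int × Int :=
  seen.foldl
    (fun lg x => if x < v then (lg.1 + 1, lg.2) else if x > v then (lg.1, lg.2 + 1) else lg)
    (0, 0)

def pvStepB (st : Int × List Int) (v : Int) : Int × List Int :=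
  let c := pvCount st.2 v
  (st.1 + min c.1 c.2, st.2 ++ [v])

def createSortedArray1_alt (instructions : List Int) : Int :=
  (instructions.foldl pvStepB (0, [])).1

-- ===== PRECONDITION & SPEC =====
def Spec_createSortedArray1 (instructions : List Int) (out : Int) : Prop := out = createSortedArray1_alt instructions
instance (instructions : List Int) (out : Int) : Decidable (Spec_createSortedArray1 instructions out) := by unfold Spec_createSortedArray1; infer_instance

-- ===== CLAIM (what is proved, stated in full; the proofs are below) =====
def Claim_equal_createSortedArray1 : Prop := ∀ (instructions : List Int), Dom_createSortedArray1 instructions → Spec_createSortedArray1 instructions (createSortedArray1 instructions)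

-- ===== LEMMAS AND PROOFS =====

-- if p holds on exactly the first b positions of s, then countP p s = b
lemma countP_eq_of_iff (p : Int → Bool) :
    ∀ (s : List Int) (b : Nat), b ≤ s.length →
      (∀ (j : Nat) (hj : j < s.length), p s[j] = true ↔ j < b) → s.countP p = b := by
  intro s
  induction s with
  | nil =>
    intro b hb _
    simp at hb
    simp [hb]
  | cons a t ih =>
    intro b hb h
    cases b with
    | zero =>
      have ha : p a = false := by
        have := h 0 (by simp)
        simpa using this
      have ht : t.countP p = 0 := by
        apply ih 0 (by omega)
        intro j hj
        have := h (j + 1) (by simpa using Nat.succ_lt_succ hj)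
        simpa using this
      simp [ha, ht]
    | succ b' =>
      have ha : p a = true := by
        have := h 0 (by simp)
        simpa using this
      have ht : t.countP p = b' := by
        apply ih b' (by simpa using hb)
        intro j hj
        have := h (j + 1) (by simpa using Nat.succ_lt_succ hj)
        simpa [Nat.succ_lt_succ_iff] using this
      simp [ha, ht]

lemma bisectLeft_eq_countP (s : List Int) (x : Int) (hs : s.Pairwise (· ≤ ·)) :
    PySem.List.bisectLeft s x = s.countP (fun y => decide (y < x)) := by
  obtain ⟨hle, h2, h3⟩ := PySem.List.bisectLeft_spec s x hs
  refine (countP_eq_of_iff _ s _ hle ?_).symm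
  intro j hj
  constructor
  · intro hp
    by_contra hnot
    have := h3 j hj (by omega)
    simp at hp
    omega
  · intro hlt
    simpa using h2 j hj hlt

lemma bisectRight_eq_countP (s : List Int) (x : Int) (hs : s.Pairwise (· ≤ ·)) :
    PySem.List.bisectRight s x = s.countP (fun y => decide (y ≤ x)) := by
  obtain ⟨hle, h2, h3⟩ := PySem.List.bisectRight_spec s x hs
  refine (countP_eq_of_iff _ s _ hle ?_).symm
  intro j hj
  constructor
  · intro hp
    by_contra hnot
    have := h3 j hj (by omega)
    simp at hp
    omega
  · intro hlt
    simpa using h2 j hj hlt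

lemma countP_le_add_gt (s : List Int) (x : Int) :
    s.countP (fun y => decide (y ≤ x)) + s.countP (fun y => decide (x < y)) = s.length := by
  induction s with
  | nil => simp
  | cons a t ih =>
    by_cases h : a ≤ x
    · simp [h, not_lt.mpr h]; omega
    · simp [h, lt_of_not_ge h]; omega

lemma pvCount_go (v : Int) :
    ∀ (s : List Int) (a b : Int),
      s.foldl
        (fun lg x => if x < v then (lg.1 + 1, lg.2) else if x > v then (lg.1, lg.2 + 1) else lg)
        (a, b)
      = (a + (s.countP (fun y => decide (y < v)) : Int),
         b + (s.countP (fun y => decide (v < y)) : Int)) := by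
  intro s
  induction s with
  | nil => intro a b; simp
  | cons x t ih =>
    intro a b
    by_cases h1 : x < v
    · simp [List.foldl_cons, h1, ih, not_lt.mpr (le_of_lt h1)]
      ring
    · by_cases h2 : v < x
      · simp [List.foldl_cons, h1, h2, ih]
        ring
      · simp [List.foldl_cons, h1, h2, ih]

lemma pvCount_eq (seen : List Int) (v : Int) :
    pvCount seen v
      = ((seen.countP (fun y => decide (y < v)) : Int),
         (seen.countP (fun y => decide (v < y)) : Int)) := by
  unfold pvCount
  rw [pvCount_go]
  simp

lemma main_loop :
    ∀ (rest : List Int) (ans : Int) (seen nums : List Int),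
      nums.Perm seen → nums.Pairwise (· ≤ ·) →
      (rest.foldl pvStepA (ans, nums)).1 = (rest.foldl pvStepB (ans, seen)).1 := by
  intro rest
  induction rest with
  | nil => intro ans seen nums _ _; rfl
  | cons inst rest ih =>
    intro ans seen nums hperm hsorted
    simp only [List.foldl_cons]
    by_cases hnil : nums = []
    · subst hnil
      have hseen : seen = [] := hperm.symm.eq_nil
      subst hseen
      have hA : pvStepA (ans, []) inst = (ans, [inst]) := by simp [pvStepA]
      have hB : pvStepB (ans, []) inst = (ans, [inst]) := by
        simp [pvStepB, pvCount_eq]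
      rw [hA, hB]
      exact ih ans [inst] [inst] (List.Perm.refl _) (by simp)
    · have hA : pvStepA (ans, nums) inst
          = (ans + min ((nums.countP (fun y => decide (y < inst)) : Int))
                       ((nums.countP (fun y => decide (inst < y)) : Int)),
             PySem.List.sorted (nums ++ [inst]) (fun x => x) false) := by
        have hgt := countP_le_add_gt nums inst
        simp only [pvStepA, if_neg hnil,
          bisectLeft_eq_countP nums inst hsorted, bisectRight_eq_countP nums inst hsorted]
        congr 2
        omega
      have hB : pvStepB (ans, seen) inst
          = (ans + min ((nums.countP (fun y => decide (y < inst)) : Int))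
                       ((nums.countP (fun y => decide (inst < y)) : Int)),
             seen ++ [inst]) := by
        simp only [pvStepB, pvCount_eq,
          hperm.countP_eq (fun y => decide (y < inst)),
          hperm.countP_eq (fun y => decide (inst < y))]
      rw [hA, hB]
      apply ih
      · exact (PySem.List.sorted_perm _ _ _).trans (hperm.append (List.Perm.refl [inst]))
      · simpa using PySem.List.sorted_pairwise (nums ++ [inst]) (fun x => x)

-- ===== VERDICT (by name: the statement is the Claim_ definition above) =====
theorem createSortedArray1_spec : Claim_equal_createSortedArray1 := by
  intro instructions _
  unfold Spec_createSortedArray1 createSortedArray1 createSortedArray1_alt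
  exact main_loop instructions 0 [] [] (List.Perm.refl _) (by simp)
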